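-- pv_equiv track=rewrite | github.com/krsy0411/coding-test | 프로그래머스/2/42586. 기능개발/기능개발.py | solution
-- ===== SOURCE A (Python) =====
-- from collections import deque
-- import math
--
-- MAX_PERCENT = 100
--
-- def solution(progresses, speeds):
--     answer = []
--     needed_days = []
--     for p, s in zip(progresses, speeds):
--         needed_days.append(math.ceil((MAX_PERCENT - p) / s))
--
--     q = deque(needed_days)
--     while q:
--         max_day = q.popleft()
--         current_count = 1
--
--         while q:
--             next_day = q[0]
--
--             if next_day <= max_day:
--                 q.popleft()
--                 current_count += 1
--             else:
--                 break
--
--         answer.append(current_count)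
--
--     return answer
-- ===== SOURCE B (Python) =====
-- import math
--
-- MAX_PERCENT = 100
--
-- def solution(progresses, speeds):
--     needed = [math.ceil((MAX_PERCENT - p) / s) for p, s in zip(progresses, speeds)]
--     bounds = []
--     run = None
--     for i, d in enumerate(needed):
--         if run is None or d > run:
--             bounds.append(i)
--             run = d
--     return [b - a for a, b in zip(bounds, bounds[1:] + [len(needed)])]
-- ===== Notes on version B (the rewrite author's own statement) =====
-- stated objective: alternative
-- what changed: B replaces A's deque simulation (nested popleft loops counting each group) with a prefix-maximum pass that materializes group-boundary indices and then turns consecutive boundary differences into group sizes.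
import Mathlib
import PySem

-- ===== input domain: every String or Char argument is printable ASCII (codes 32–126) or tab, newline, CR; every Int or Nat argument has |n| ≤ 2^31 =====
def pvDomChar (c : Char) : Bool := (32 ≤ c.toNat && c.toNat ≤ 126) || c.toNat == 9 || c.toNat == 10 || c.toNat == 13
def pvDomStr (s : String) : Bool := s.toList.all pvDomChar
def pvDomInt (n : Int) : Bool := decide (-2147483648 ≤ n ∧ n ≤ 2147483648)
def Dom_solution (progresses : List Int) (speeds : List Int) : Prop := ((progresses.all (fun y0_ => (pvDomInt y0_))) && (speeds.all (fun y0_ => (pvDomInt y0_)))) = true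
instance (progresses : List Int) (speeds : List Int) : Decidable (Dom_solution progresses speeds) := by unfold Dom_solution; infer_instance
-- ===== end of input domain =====

-- B differs from A by computing group-boundary indices from a running prefix maximum and
-- diffing consecutive boundaries, instead of A's deque simulation with nested popleft loops.

-- math.ceil((100 - p) / s): on Dom (|values| ≤ 2^31, s ≠ 0) the float quotient never rounds
-- across an integer, so the value is exactly the integer ceiling -((-a) // s).
def pvCeilDiv (a s : Int) : Int := -(PySem.Int.floordiv (-a) s)

-- ===== PORT A =====
-- inner 'while q: next_day = q[0]; if next_day <= max_day: popleft; count += 1 else break'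
def pvAInner (maxDay : Int) : List Int → Int → Int × List Int
  | [], c => (c, [])
  | x :: q, c => if x ≤ maxDay then pvAInner maxDay q (c + 1) else (c, x :: q)

-- termination measure for the outer loop (cited by pvALoop's decreasing_by)
lemma pvAInner_len (m : Int) : ∀ (q : List Int) (c : Int), (pvAInner m q c).2.length ≤ q.length := by
  intro q
  induction q with
  | nil => intro c; simp [pvAInner]
  | cons x q ih =>
    intro c
    by_cases h : x ≤ m
    · simpa [pvAInner, h] using Nat.le_succ_of_le (ih (c + 1))
    · simp [pvAInner, h]

-- outer 'while q: max_day = q.popleft(); …; answer.append(current_count)'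
def pvALoop : List Int → List Int
  | [] => []
  | d :: q =>
    let r := pvAInner d q 1
    r.1 :: pvALoop r.2
termination_by l => l.length
decreasing_by
  exact Nat.lt_succ_of_le (pvAInner_len d q 1)

def solution (progresses : List Int) (speeds : List Int) : List Int :=
  let neededDays := (progresses.zip speeds).foldl
    (fun acc ps => acc ++ [pvCeilDiv (100 - ps.1) ps.2]) []
  pvALoop neededDays

-- ===== PORT B =====
def solution_alt (progresses : List Int) (speeds : List Int) : List Int :=
  let needed := (progresses.zip speeds).map (fun ps => pvCeilDiv (100 - ps.1) ps.2)
  let st := (PySem.List.enumerate needed).foldl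
    (fun (st : List Int × Option Int) id =>
      match st.2 with
      | none => (st.1 ++ [id.1], some id.2)
      | some run => if run < id.2 then (st.1 ++ [id.1], some id.2) else st)
    ([], none)
  ((st.1.zip (st.1.drop 1 ++ [(needed.length : Int)])).map (fun ab => ab.2 - ab.1))

-- ===== PRECONDITION & SPEC =====
-- Pre_ excludes exactly the inputs where A raises ZeroDivisionError: a zero speed among the zipped pairs.
def Pre_solution (progresses : List Int) (speeds : List Int) : Prop :=
  ∀ ps ∈ progresses.zip speeds, ps.2 ≠ 0
instance (progresses : List Int) (speeds : List Int) : Decidable (Pre_solution progresses speeds) := by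
  unfold Pre_solution; infer_instance
def pvWitness_solution : List Int × List Int := ([93, 30, 55], [1, 30, 5])
def Spec_solution (progresses : List Int) (speeds : List Int) (out : List Int) : Prop := out = solution_alt progresses speeds
instance (progresses : List Int) (speeds : List Int) (out : List Int) : Decidable (Spec_solution progresses speeds out) := by unfold Spec_solution; infer_instance

-- ===== CLAIM (what is proved, stated in full; the proofs are below) =====
def Claim_equal_solution : Prop := ∀ (progresses : List Int) (speeds : List Int), Dom_solution progresses speeds → Pre_solution progresses speeds → Spec_solution progresses speeds (solution progresses speeds)

-- ===== LEMMAS AND PROOFS =====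

-- A's inner loop splits the queue at the first element exceeding maxDay
lemma pvAInner_eq (m : Int) : ∀ (q : List Int) (c : Int),
    pvAInner m q c = (c + ((q.takeWhile (fun x => decide (x ≤ m))).length : Int),
                      q.dropWhile (fun x => decide (x ≤ m))) := by
  intro q
  induction q with
  | nil => intro c; simp [pvAInner]
  | cons x q ih =>
    intro c
    by_cases h : x ≤ m
    · simp [pvAInner, h, ih (c + 1)]
      omega
    · simp [pvAInner, h]

-- B's boundary computation as structural recursion
def pvBoundsRec (i : Int) (run : Option Int) : List Int → List Int
  | [] => []
  | d :: q =>
    match run with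
    | none => i :: pvBoundsRec (i + 1) (some d) q
    | some r => if r < d then i :: pvBoundsRec (i + 1) (some d) q else pvBoundsRec (i + 1) (some r) q

-- the foldl over the enumerated list computes pvBoundsRec
lemma pvFold_eq_boundsRec : ∀ (l : List Int) (j : Int) (acc : List Int) (run : Option Int),
    ((PySem.List.enumerate l j).foldl
      (fun (st : List Int × Option Int) id =>
        match st.2 with
        | none => (st.1 ++ [id.1], some id.2)
        | some run => if run < id.2 then (st.1 ++ [id.1], some id.2) else st)
      (acc, run)).1 = acc ++ pvBoundsRec j run l := by
  intro l
  induction l with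
  | nil => intro j acc run; simp [PySem.List.enumerate_nil, pvBoundsRec]
  | cons d q ih =>
    intro j acc run
    rw [PySem.List.enumerate_cons]
    match run with
    | none => simp [List.foldl_cons, ih, pvBoundsRec]
    | some r =>
      by_cases h : r < d
      · simp [List.foldl_cons, h, ih, pvBoundsRec]
      · simp [List.foldl_cons, h, ih, pvBoundsRec]

-- a run of elements ≤ the current maximum produces no boundaries
lemma pvBoundsRec_skip (r : Int) : ∀ (t : List Int) (i : Int) (rest : List Int),
    (∀ x ∈ t, x ≤ r) →
    pvBoundsRec i (some r) (t ++ rest) = pvBoundsRec (i + t.length) (some r) rest := by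
  intro t
  induction t with
  | nil => intro i rest _; simp
  | cons x t ih =>
    intro i rest h
    have hx : ¬ r < x := by have := h x (by simp); omega
    have := ih (i + 1) rest (fun y hy => h y (by simp [hy]))
    simp only [List.cons_append, pvBoundsRec, hx, if_false, this]
    congr 1
    simp only [List.length_cons]
    push_cast
    omega

-- when the next element exceeds the running maximum, the maximum might as well be absent
lemma pvBoundsRec_reset (m r : Int) : ∀ (rest : List Int),
    (∀ x ∈ rest.head?, r < x) →
    pvBoundsRec m (some r) rest = pvBoundsRec m none rest := by
  intro rest h
  match rest with
  | [] => rfl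
  | x :: rest' =>
    have hx : r < x := h x (by simp)
    simp [pvBoundsRec, hx]

-- successive differences of the boundary list with a final endpoint
def pvDiffs : List Int → Int → List Int
  | [], _ => []
  | [b], n => [n - b]
  | b0 :: b1 :: bs, n => (b1 - b0) :: pvDiffs (b1 :: bs) n

-- B's zip/map expression computes pvDiffs
lemma pvZip_eq_diffs : ∀ (bs : List Int) (n : Int),
    ((bs.zip (bs.drop 1 ++ [n])).map (fun ab => ab.2 - ab.1)) = pvDiffs bs n := by
  intro bs
  induction bs with
  | nil => intro n; simp [pvDiffs]
  | cons b0 bs ih =>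
    intro n
    match bs with
    | [] => simp [pvDiffs]
    | b1 :: bs' =>
      have := ih n
      simp only [List.drop_one, List.tail_cons] at this ⊢
      simp [pvDiffs, this.symm]

-- main invariant: boundary differences reproduce A's group sizes
lemma pvMainAux : ∀ (n : Nat) (l : List Int), l.length ≤ n → ∀ (i : Int),
    pvDiffs (pvBoundsRec i none l) (i + l.length) = pvALoop l := by
  intro n
  induction n with
  | zero =>
    intro l hl i
    have : l = [] := List.length_eq_zero_iff.mp (Nat.le_zero.mp hl)
    subst this
    simp [pvBoundsRec, pvALoop, pvDiffs]
  | succ n ih =>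
    intro l hl i
    match l with
    | [] => simp [pvBoundsRec, pvALoop, pvDiffs]
    | d :: q =>
      have hAL : pvALoop (d :: q)
          = (1 + ((q.takeWhile (fun x => decide (x ≤ d))).length : Int))
            :: pvALoop (q.dropWhile (fun x => decide (x ≤ d))) := by
        rw [pvALoop]
        simp [pvAInner_eq]
      set p : Int → Bool := fun x => decide (x ≤ d) with hp
      set t := q.takeWhile p with ht
      set r := q.dropWhile p with hr
      have hq : t ++ r = q := List.takeWhile_append_dropWhile
      have hB : pvBoundsRec i none (d :: q) = i :: pvBoundsRec (i + 1) (some d) q := rfl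
      have hskip : pvBoundsRec (i + 1) (some d) q
          = pvBoundsRec (i + 1 + t.length) (some d) r := by
        rw [← hq]
        exact pvBoundsRec_skip d t (i + 1) r
          (fun x hx => by simpa [hp] using List.mem_takeWhile_imp hx)
      have hhead : ∀ x ∈ r.head?, d < x := by
        intro x hx
        have h3 := List.head?_dropWhile_not p q
        rw [← hr] at h3
        cases hc : r with
        | nil => rw [hc] at hx; simp at hx
        | cons y r' =>
          rw [hc] at hx h3
          simp at hx h3
          subst hx
          simp [hp] at h3
          omega
      have hreset : pvBoundsRec (i + 1 + t.length) (some d) r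
          = pvBoundsRec (i + 1 + t.length) none r :=
        pvBoundsRec_reset (i + 1 + (t.length : Int)) d r hhead
      have hlen : t.length + r.length = q.length := by
        rw [← hq]; simp
      rcases hrr : r with _ | ⟨x, r'⟩
      · have htq : t.length = q.length := by
          rw [hrr] at hlen; simpa using hlen
        rw [hB, hskip, hAL, hrr]
        simp [pvBoundsRec, pvDiffs, pvALoop]
        omega
      · have hrlen : r'.length + 1 <= n := by
          have h2 := List.length_dropWhile_le p q
          rw [← hr, hrr] at h2
          simp at h2 hl
          omega
        have hIH := ih (x :: r') (by simpa using hrlen) (i + 1 + t.length)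
        rw [hB, hskip, hreset, hAL, hrr]
        rw [pvBoundsRec]
        rw [pvBoundsRec] at hIH
        rw [pvDiffs]
        have hend : i + (((d :: q).length : Nat) : Int)
            = i + 1 + (t.length : Int) + (((x :: r').length : Nat) : Int) := by
          rw [hrr] at hlen
          simp only [List.length_cons] at hlen ⊢
          push_cast
          omega
        rw [hend, hIH]
        congr 1
        omega

lemma pvMain (l : List Int) (i : Int) :
    pvDiffs (pvBoundsRec i none l) (i + l.length) = pvALoop l :=
  pvMainAux l.length l le_rfl i

-- A's needed_days accumulator equals B's map
lemma pvFoldAppendMap (f : Int × Int → Int) : ∀ (l : List (Int × Int)) (acc : List Int),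
    l.foldl (fun a x => a ++ [f x]) acc = acc ++ l.map f := by
  intro l
  induction l with
  | nil => intro acc; simp
  | cons x l ih => intro acc; simp [ih]

-- ===== VERDICT (by name: the statement is the Claim_ definition above) =====
theorem solution_spec : Claim_equal_solution := by
  intro progresses speeds _ _
  unfold Spec_solution solution solution_alt
  simp only [pvFoldAppendMap, List.nil_append]
  rw [pvFold_eq_boundsRec, List.nil_append, pvZip_eq_diffs]
  have := pvMain ((progresses.zip speeds).map (fun ps => pvCeilDiv (100 - ps.1) ps.2)) 0
  rw [zero_add] at this
  rw [this]
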